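-- pv_equiv track=rewrite | github.com/pkch93/Algorithm | Beakjoon_Online_Judge/array_clear.py | solution
-- ===== SOURCE A (Python) =====
-- def solution(arr, y, x):
--     answer = [[arr[i][j] if j == 0 else 0
--                for j in range(x)] for i in range(y)]
--     for i in range(y):
--         for j in range(1, x):
--             if arr[i][j]:
--                 answer[i][j] += answer[i][j-1] + 1
--     return answer
-- ===== SOURCE B (Python) =====
-- def solution(arr, y, x):
--     # Each cell is computed independently from the row itself: walk back to the
--     # start of the truthy run ending at column j (falling back to the column-0
--     # seed when the run reaches the left edge), instead of A's seeded-matrix +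
--     # left-to-right in-place recurrence.
--     def cell(row, j):
--         if j == 0:
--             return row[0]
--         if not row[j]:
--             return 0
--         p = j
--         while p > 1 and row[p - 1]:
--             p -= 1
--         return row[0] + j if p == 1 else j - p + 1
--     return [[cell(arr[i], j) for j in range(x)] for i in range(y)]
-- ===== Notes on version B (the rewrite author's own statement) =====
-- stated objective: alternative
-- what changed: Replaces A's seeded-matrix + left-to-right in-place recurrence (answer[i][j] += answer[i][j-1] + 1) by computing every cell independently: a backward walk to the start of the truthy run ending at column j, with a closed form from the run length and the column-0 seed; no output cell is ever read back.
import Mathlib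
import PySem

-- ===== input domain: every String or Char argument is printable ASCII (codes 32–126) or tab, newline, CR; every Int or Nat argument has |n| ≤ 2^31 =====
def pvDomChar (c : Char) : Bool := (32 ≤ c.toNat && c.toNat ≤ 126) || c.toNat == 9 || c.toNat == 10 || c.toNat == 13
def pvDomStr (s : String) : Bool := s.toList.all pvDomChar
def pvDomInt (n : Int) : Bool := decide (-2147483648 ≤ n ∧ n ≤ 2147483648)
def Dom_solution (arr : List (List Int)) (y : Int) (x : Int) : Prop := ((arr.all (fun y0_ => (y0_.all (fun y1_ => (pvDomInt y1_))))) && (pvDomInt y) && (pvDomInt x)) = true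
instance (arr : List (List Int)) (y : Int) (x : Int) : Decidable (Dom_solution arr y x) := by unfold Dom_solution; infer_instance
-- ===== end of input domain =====

-- B replaces A's seeded-matrix + in-place recurrence by an independent per-cell
-- backward walk to the start of the truthy run (objective: alternative).

-- ===== PORT A =====
def solution (arr : List (List Int)) (y : Int) (x : Int) : List (List Int) :=
  let answer := (PySem.List.pyRange 0 y 1).map (fun i =>
    (PySem.List.pyRange 0 x 1).map (fun j =>
      if j == 0 then PySem.List.pyGetD (PySem.List.pyGetD arr i []) j 0 else 0))
  (PySem.List.pyRange 0 y 1).foldl (fun ans i =>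
    (PySem.List.pyRange 1 x 1).foldl (fun ans j =>
      if PySem.List.pyGetD (PySem.List.pyGetD arr i []) j 0 ≠ 0 then
        PySem.List.pySetD ans i
          (PySem.List.pySetD (PySem.List.pyGetD ans i []) j
            (PySem.List.pyGetD (PySem.List.pyGetD ans i []) j 0
              + PySem.List.pyGetD (PySem.List.pyGetD ans i []) (j - 1) 0 + 1))
      else ans) ans) answer

-- ===== PORT B =====
-- Source B's backward 'while p > 1 and row[p-1]: p -= 1'; the loop counter p starts at
-- the nonnegative column index, so it is a Nat and the recursion decreases it.
def backP (row : List Int) : Nat → Nat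
  | 0 => 0
  | 1 => 1
  | p + 2 => if PySem.List.pyGetD row ((p + 1 : Nat) : Int) 0 ≠ 0 then backP row (p + 1) else p + 2

-- Source B's 'cell(row, j)'
def cellB (row : List Int) (j : Int) : Int :=
  if j = 0 then PySem.List.pyGetD row 0 0
  else if PySem.List.pyGetD row j 0 = 0 then 0
  else
    let p := backP row j.toNat
    if p = 1 then PySem.List.pyGetD row 0 0 + j else j - (p : Int) + 1

def solution_alt (arr : List (List Int)) (y : Int) (x : Int) : List (List Int) :=
  (PySem.List.pyRange 0 y 1).map (fun i =>
    (PySem.List.pyRange 0 x 1).map (fun j => cellB (PySem.List.pyGetD arr i []) j))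

-- ===== PRECONDITION & SPEC =====
-- Pre_ excludes exactly the inputs where the Python A raises IndexError: when x > 0
-- it indexes the first y rows of arr at columns 0..x-1.
def Pre_solution (arr : List (List Int)) (y : Int) (x : Int) : Prop :=
  0 < x → (y ≤ (arr.length : Int) ∧ ∀ row ∈ arr.take y.toNat, x ≤ (row.length : Int))
instance (arr : List (List Int)) (y : Int) (x : Int) : Decidable (Pre_solution arr y x) := by
  unfold Pre_solution; infer_instance

def pvWitness_solution : List (List Int) × Int × Int := ([[1, 2], [0, 3]], 2, 2)

def Spec_solution (arr : List (List Int)) (y : Int) (x : Int) (out : List (List Int)) : Prop := out = solution_alt arr y x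
instance (arr : List (List Int)) (y : Int) (x : Int) (out : List (List Int)) : Decidable (Spec_solution arr y x out) := by unfold Spec_solution; infer_instance

-- ===== CLAIM (what is proved, stated in full; the proofs are below) =====
def Claim_equal_solution : Prop := ∀ (arr : List (List Int)) (y : Int) (x : Int), Dom_solution arr y x → Pre_solution arr y x → Spec_solution arr y x (solution arr y x)

-- ===== LEMMAS AND PROOFS =====

-- the running value at column n of one row (the spec both proofs meet)
def rv (row : List Int) : Nat → Int
  | 0 => row.getD 0 0
  | n + 1 => if row.getD (n + 1) 0 ≠ 0 then rv row n + 1 else 0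

-- A's in-place column update on a single row
def updA (ai : List Int) (r : List Int) (j : Int) : List Int :=
  if PySem.List.pyGetD ai j 0 ≠ 0 then
    PySem.List.pySetD r j
      (PySem.List.pyGetD r j 0 + PySem.List.pyGetD r (j - 1) 0 + 1)
  else r

theorem pv_getD_set_self {α : Type} (m : List α) (i : Nat) (h : i < m.length) (v d : α) :
    (m.set i v).getD i d = v := by
  rw [List.getD_eq_getElem _ d (by simpa using h)]; simp

theorem pv_set_append_mid {α : Type} (as : List α) (b v : α) (cs : List α) (L : Nat)
    (hL : as.length = L) : (as ++ b :: cs).set L v = as ++ v :: cs := by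
  subst hL; rw [List.set_append]; simp

theorem pv_getD_append_mid {α : Type} (as : List α) (b : α) (cs : List α) (d : α) (L : Nat)
    (hL : as.length = L) : (as ++ b :: cs).getD L d = b := by
  subst hL; rw [List.getD_eq_getElem _ d (by simp)]; simp

theorem pv_set_map_range {α : Type} (g : Nat → α) (N c : Nat) (v : α) :
    ((List.range N).map g).set c v
      = (List.range N).map (fun k => if k = c then v else g k) := by
  apply List.ext_getElem (by simp)
  intro i h1 h2
  simp only [List.getElem_set, List.getElem_map, List.getElem_range]
  rcases eq_or_ne i c with h | h
  · simp [h]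
  · simp [h, Ne.symm h]

-- A's inner loop only touches row i: it collapses to one set of row i
theorem innerA_collapse (ai : List Int) (js : List Int) (m : List (List Int)) (i : Nat)
    (hi : i < m.length) :
    js.foldl (fun ans j =>
      if PySem.List.pyGetD ai j 0 ≠ 0 then
        ans.set i (PySem.List.pySetD (ans.getD i [])
          j (PySem.List.pyGetD (ans.getD i []) j 0
              + PySem.List.pyGetD (ans.getD i []) (j - 1) 0 + 1))
      else ans) m
    = m.set i (js.foldl (updA ai) (m.getD i [])) := by
  induction js generalizing m with
  | nil =>
      simp only [List.foldl_nil]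
      rw [List.getD_eq_getElem m [] hi]
      exact (List.set_getElem_self hi).symm
  | cons j js ih =>
      simp only [List.foldl_cons, updA]
      by_cases hc : PySem.List.pyGetD ai j 0 ≠ 0
      · simp only [if_pos hc]
        rw [ih _ (by simpa using hi), pv_getD_set_self m i hi, List.set_set]
      · simp only [if_neg hc]
        exact ih m hi

-- A's seeded row is the raw first entry followed by zeros
theorem rowA_init (ai : List Int) (n : Nat) :
    (PySem.List.pyRange 0 ((n : Int) + 1) 1).map
        (fun j => if j == 0 then PySem.List.pyGetD ai j 0 else 0)
      = rv ai 0 :: List.replicate n 0 := by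
  rw [PySem.List.pyRange_one_cons (by omega : (0:Int) < (n : Int) + 1)]
  simp only [List.map_cons, zero_add]
  congr 1
  · simp [PySem.List.pyGetD_zero, rv]
  · rw [List.map_congr_left (g := fun _ => (0 : Int))
        (by intro j hj
            rw [PySem.List.mem_pyRange_one] at hj
            simp [show j ≠ 0 by omega]),
      List.map_const']
    congr 1
    rw [PySem.List.length_pyRange_one]
    omega

-- A's update loop on one row computes the running counts
theorem rowA_run (ai : List Int) (n : Nat) :
    ∀ k, k ≤ n →
      (PySem.List.pyRange 1 ((k : Int) + 1) 1).foldl (updA ai)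
          (rv ai 0 :: List.replicate n 0)
        = (List.range (k + 1)).map (rv ai) ++ List.replicate (n - k) 0 := by
  intro k
  induction k with
  | zero =>
      intro _
      rw [PySem.List.pyRange_one_eq_nil (by omega)]
      simp [List.range_succ]
  | succ k ih =>
      intro hk
      have hsplit : PySem.List.pyRange 1 ((k:Int) + 1 + 1) 1
          = PySem.List.pyRange 1 ((k:Int) + 1) 1 ++ [(k:Int) + 1] :=
        PySem.List.pyRange_one_succ_right (by omega)
      rw [show ((k + 1 : Nat) : Int) + 1 = (k:Int) + 1 + 1 by push_cast; ring,
        hsplit, List.foldl_append, ih (by omega)]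
      simp only [List.foldl_cons, List.foldl_nil]
      have hrep : List.replicate (n - k) (0 : Int) = 0 :: List.replicate (n - (k+1)) 0 := by
        rw [show n - k = (n - (k+1)) + 1 by omega]
        simp [List.replicate_succ]
      have hlen : ((List.range (k+1)).map (rv ai)).length = k + 1 := by simp
      have hcast : ((k:Int) + 1) = ((k + 1 : Nat) : Int) := by push_cast; ring
      unfold updA
      rw [hcast]
      simp only [PySem.List.pyGetD_natCast,
        show ((k + 1 : Nat) : Int) - 1 = ((k : Nat) : Int) by push_cast; ring,
        PySem.List.pySetD_natCast]
      have hprev : ((List.range (k+1)).map (rv ai) ++ List.replicate (n - k) 0).getD k 0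
          = rv ai k := by
        rw [List.getD_eq_getElem _ _ (by simp; omega)]
        rw [List.getElem_append_left (by simp)]
        simp
      have hcur : ((List.range (k+1)).map (rv ai) ++ List.replicate (n - k) 0).getD (k+1) 0
          = 0 := by
        rw [hrep, pv_getD_append_mid _ _ _ _ _ hlen]
      rw [hrep] at hprev hcur ⊢
      by_cases hc : ai.getD (k+1) 0 ≠ 0
      · simp only [if_pos hc, hprev, hcur]
        rw [pv_set_append_mid _ _ _ _ _ hlen]
        rw [show List.range (k + 1 + 1) = List.range (k + 1) ++ [k + 1] from List.range_succ,
          List.map_append]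
        have : rv ai (k + 1) = rv ai k + 1 := by simp only [rv]; rw [if_pos hc]
        simp [this]
      · simp only [if_neg hc]
        rw [show List.range (k + 1 + 1) = List.range (k + 1) ++ [k + 1] from List.range_succ,
          List.map_append]
        have : rv ai (k + 1) = 0 := by simp only [rv]; rw [if_neg hc]
        simp [this]

-- A's outer loop: each row update is independent, so the fold is a map
theorem outerA (arr : List (List Int)) (x : Int) (n : Nat) (hx : x = (n : Int) + 1) (N : Nat) :
    ∀ c, c ≤ N →
      (List.range c).foldl
        (fun ans k =>
          (PySem.List.pyRange 1 x 1).foldl (fun ans j =>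
            if PySem.List.pyGetD (arr.getD k []) j 0 ≠ 0 then
              ans.set k (PySem.List.pySetD (ans.getD k []) j
                (PySem.List.pyGetD (ans.getD k []) j 0
                  + PySem.List.pyGetD (ans.getD k []) (j - 1) 0 + 1))
            else ans) ans)
        ((List.range N).map (fun k => (PySem.List.pyRange 0 x 1).map
            (fun j => if j == 0 then PySem.List.pyGetD (arr.getD k []) j 0 else 0)))
      = (List.range N).map (fun k =>
          if k < c then (List.range (n + 1)).map (rv (arr.getD k []))
          else (PySem.List.pyRange 0 x 1).map
            (fun j => if j == 0 then PySem.List.pyGetD (arr.getD k []) j 0 else 0)) := by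
  intro c
  induction c with
  | zero => intro _; simp
  | succ c ih =>
      intro hc
      rw [show List.range (c + 1) = List.range c ++ [c] from List.range_succ,
        List.foldl_append, ih (by omega)]
      simp only [List.foldl_cons, List.foldl_nil]
      rw [innerA_collapse (arr.getD c []) _ _ c (by simp; omega)]
      rw [PySem.List.getD_map_range _ N c [] (by omega)]
      rw [if_neg (by omega)]
      rw [hx, rowA_init, rowA_run _ n n le_rfl]
      simp only [Nat.sub_self, List.replicate_zero, List.append_nil]
      rw [pv_set_map_range]
      apply List.map_congr_left
      intro k hk
      rcases Nat.lt_trichotomy k c with h | h | h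
      · simp [h, Nat.lt_succ_of_lt h, Nat.ne_of_lt h]
      · simp [h]
      · rw [if_neg (by omega : ¬ k = c), if_neg (by omega : ¬ k < c),
          if_neg (by omega : ¬ k < c + 1)]

-- B's independent per-cell backward walk computes the same running value
theorem cellB_rv (row : List Int) : ∀ j : Nat, cellB row (j : Int) = rv row j := by
  intro j
  induction j with
  | zero => simp [cellB, rv, PySem.List.pyGetD_zero]
  | succ j ih =>
      have htn : (((j + 1 : Nat) : Int)).toNat = j + 1 := by omega
      rw [show cellB row ((j + 1 : Nat) : Int)
            = if PySem.List.pyGetD row ((j + 1 : Nat) : Int) 0 = 0 then 0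
              else if backP row (j + 1) = 1 then
                PySem.List.pyGetD row 0 0 + ((j + 1 : Nat) : Int)
              else ((j + 1 : Nat) : Int) - (backP row (j + 1) : Int) + 1 from by
            simp only [cellB, htn]
            rw [if_neg (by omega : ¬ (((j + 1 : Nat) : Int) = 0))]]
      rw [PySem.List.pyGetD_natCast]
      by_cases hz : row.getD (j + 1) 0 = 0
      · rw [if_pos hz]
        simp only [rv]
        rw [if_neg (not_not_intro hz)]
      · rw [if_neg hz]
        have hrv : rv row (j + 1) = rv row j + 1 := by simp only [rv]; rw [if_pos hz]
        rw [hrv]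
        cases j with
        | zero =>
            rw [show backP row (0 + 1) = 1 from rfl, if_pos rfl]
            simp [rv, PySem.List.pyGetD_zero]
        | succ j' =>
            rw [show backP row (j' + 1 + 1)
                  = if PySem.List.pyGetD row ((j' + 1 : Nat) : Int) 0 ≠ 0 then
                      backP row (j' + 1) else j' + 2 from rfl,
              PySem.List.pyGetD_natCast]
            by_cases hp : row.getD (j' + 1) 0 = 0
            · rw [if_neg (not_not_intro hp), if_neg (by omega : ¬ (j' + 2) = 1)]
              have h0 : rv row (j' + 1) = 0 := by
                simp only [rv]; rw [if_neg (not_not_intro hp)]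
              rw [h0]; push_cast; ring
            · rw [if_pos hp, ← ih]
              have htn' : (((j' + 1 : Nat) : Int)).toNat = j' + 1 := by omega
              rw [show cellB row ((j' + 1 : Nat) : Int)
                    = if backP row (j' + 1) = 1 then
                        PySem.List.pyGetD row 0 0 + ((j' + 1 : Nat) : Int)
                      else ((j' + 1 : Nat) : Int) - (backP row (j' + 1) : Int) + 1 from by
                    simp only [cellB, htn']
                    rw [if_neg (by omega : ¬ (((j' + 1 : Nat) : Int) = 0)),
                      PySem.List.pyGetD_natCast, if_neg hp]]
              by_cases h1 : backP row (j' + 1) = 1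
              · rw [if_pos h1, if_pos h1]; push_cast; ring
              · rw [if_neg h1, if_neg h1]; push_cast; ring

-- the two ports agree on every input
theorem solution_main (arr : List (List Int)) (y : Int) (x : Int) :
    solution arr y x = solution_alt arr y x := by
  by_cases hx : x ≤ 0
  · have h0 : PySem.List.pyRange 0 x 1 = [] := PySem.List.pyRange_one_eq_nil (by omega)
    have h1 : PySem.List.pyRange 1 x 1 = [] := PySem.List.pyRange_one_eq_nil (by omega)
    simp [solution, solution_alt, h0, h1]
  · rw [not_le] at hx
    have hxn : x = ((x - 1).toNat : Int) + 1 := by omega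
    set n := (x - 1).toNat with hn
    by_cases hy : y ≤ 0
    · have h0 : PySem.List.pyRange 0 y 1 = [] := PySem.List.pyRange_one_eq_nil (by omega)
      simp [solution, solution_alt, h0]
    · have hyN : y = (y.toNat : Int) := by omega
      set N := y.toNat with hN
      -- A side
      have ha : solution arr y x
          = (List.range N).map (fun k => (List.range (n + 1)).map (rv (arr.getD k []))) := by
        simp only [solution]
        rw [hyN, PySem.List.pyRange_zero_nat, List.foldl_map, List.map_map]
        simp only [Function.comp_def, PySem.List.pyGetD_natCast, PySem.List.pySetD_natCast]
        rw [outerA arr x n hxn N N le_rfl]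
        apply List.map_congr_left
        intro k hk
        rw [if_pos (by simpa using hk)]
      -- B side
      have hb : solution_alt arr y x
          = (List.range N).map (fun k => (List.range (n + 1)).map (rv (arr.getD k []))) := by
        simp only [solution_alt]
        rw [hyN, PySem.List.pyRange_zero_nat, List.map_map]
        apply List.map_congr_left
        intro k _
        simp only [Function.comp_def, PySem.List.pyGetD_natCast]
        rw [hxn, show ((n : Int) + 1) = ((n + 1 : Nat) : Int) by push_cast; ring,
          PySem.List.pyRange_zero_nat, List.map_map]
        apply List.map_congr_left
        intro j _
        exact cellB_rv (arr.getD k []) j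
      rw [ha, hb]

-- ===== VERDICT (by name: the statement is the Claim_ definition above) =====
theorem solution_spec : Claim_equal_solution := by
  intro arr y x _ _
  unfold Spec_solution
  exact solution_main arr y x
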